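-- pv_equiv track=rewrite | github.com/CorradoColaleo/CyberChallengeIT | TestDiAmmissione/Attachments/indexes.py | precompute_triples
-- ===== SOURCE A (Python) =====
-- import math
--
-- def precompute_triples(M):
--     triples = []
--     for x in range(1, M+1):
--         for y in range(x, M+1):
--             product = x*y
--             z = int(math.isqrt(product))
--             if z*z == product and z <= M:
--                 triples.append((x, y, z))
--                 if y != x:
--                     triples.append((y, x, z))
--     return triples
-- ===== SOURCE B (Python) =====
-- import math
--
-- def precompute_triples(M):
--     # Decompose each x as k * a*a with a maximal (k squarefree); then the partners y
--     # with x*y a perfect square are exactly k*b*b for b >= a, and z = k*a*b <= y <= M.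
--     triples = []
--     for x in range(1, M + 1):
--         a = math.isqrt(x)
--         while x % (a * a) != 0:
--             a -= 1
--         k = x // (a * a)
--         b = a
--         while k * b * b <= M:
--             y = k * b * b
--             triples.append((x, y, k * a * b))
--             if y != x:
--                 triples.append((y, x, k * a * b))
--             b += 1
--     return triples
-- ===== Notes on version B (the rewrite author's own statement) =====
-- stated objective: faster
-- what changed: Instead of scanning all O(M^2) pairs (x,y) and testing each product for squareness, B decomposes each x as k*a^2 with k squarefree and enumerates its partners directly as y = k*b^2 for b >= a while y <= M, so the inner loop only visits actual solutions.
import Mathlib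
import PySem

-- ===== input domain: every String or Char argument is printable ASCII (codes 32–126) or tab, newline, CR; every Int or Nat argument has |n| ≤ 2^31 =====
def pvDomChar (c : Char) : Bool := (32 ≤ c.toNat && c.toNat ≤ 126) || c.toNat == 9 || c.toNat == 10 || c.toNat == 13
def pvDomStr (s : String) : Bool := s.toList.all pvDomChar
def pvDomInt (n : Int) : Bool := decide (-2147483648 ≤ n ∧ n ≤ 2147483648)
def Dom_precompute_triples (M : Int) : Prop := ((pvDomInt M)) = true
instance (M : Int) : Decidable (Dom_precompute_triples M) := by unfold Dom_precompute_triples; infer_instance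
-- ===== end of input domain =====

-- B replaces A's O(M^2) scan of all pairs (x,y) by a per-x squarefree decomposition
-- x = k*a^2 and direct enumeration of the partners y = k*b^2, b >= a (objective: faster).

-- ===== PORT A =====
-- math.isqrt(product) is ported as Nat.sqrt of product.toNat: exact here, since inside
-- the loops x, y >= 1, so product = x*y >= 0 (math.isqrt never sees a negative argument).
def precompute_triples (M : Int) : List (List Int) :=
  (PySem.List.pyRange 1 (M+1) 1).foldl (fun triples x =>
    (PySem.List.pyRange x (M+1) 1).foldl (fun triples y =>
      let product := x * y
      let z : Int := ((product.toNat.sqrt : Nat) : Int)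
      if z * z = product ∧ z ≤ M then
        let triples := triples ++ [[x, y, z]]
        if y ≠ x then triples ++ [[y, x, z]] else triples
      else triples) triples) []

-- ===== PORT B =====
-- the `while x % (a*a) != 0: a -= 1` countdown of Source B, as structural recursion on a
def pvFindA (x : Nat) : Nat → Nat
  | 0 => 0
  | a+1 => if x % ((a+1)*(a+1)) = 0 then a+1 else pvFindA x a

-- the `while k*b*b <= M: ... b += 1` loop of Source B.  In every reachable call k >= 1 and
-- M >= 1, so the guard `0 < k ∧ k*b*b ≤ M.toNat` coincides with Python's `k*b*b <= M`;
-- the extra `0 < k` conjunct only serves termination.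
def pvLoopB (M : Int) (k a : Nat) (x : Int) (b : Nat) (acc : List (List Int)) : List (List Int) :=
  if h : 0 < k ∧ k*b*b ≤ M.toNat then
    let y : Int := ((k*b*b : Nat) : Int)
    let acc := acc ++ [[x, y, ((k*a*b : Nat) : Int)]]
    let acc := if y ≠ x then acc ++ [[y, x, ((k*a*b : Nat) : Int)]] else acc
    pvLoopB M k a x (b+1) acc
  else acc
termination_by M.toNat + 1 - b
decreasing_by
  obtain ⟨hk, hle⟩ := h
  rcases Nat.eq_zero_or_pos b with hb | hb
  · omega
  · have h1 : b ≤ b*b := Nat.le_mul_of_pos_left b hb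
    have h2 : b*b ≤ k*b*b := by
      calc b*b ≤ k*(b*b) := Nat.le_mul_of_pos_left _ hk
        _ = k*b*b := by ring
    omega

def precompute_triples_alt (M : Int) : List (List Int) :=
  (PySem.List.pyRange 1 (M+1) 1).foldl (fun triples x =>
    let a := pvFindA x.toNat (Nat.sqrt x.toNat)
    let k := x.toNat / (a*a)
    pvLoopB M k a x a triples) []

-- ===== PRECONDITION & SPEC =====
def Spec_precompute_triples (M : Int) (out : List (List Int)) : Prop := out = precompute_triples_alt M
instance (M : Int) (out : List (List Int)) : Decidable (Spec_precompute_triples M out) := by unfold Spec_precompute_triples; infer_instance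

-- ===== CLAIM (what is proved, stated in full; the proofs are below) =====
def Claim_equal_precompute_triples : Prop := ∀ (M : Int), Dom_precompute_triples M → Spec_precompute_triples M (precompute_triples M)

-- ===== LEMMAS AND PROOFS =====
def pvA (n : Nat) : Nat := pvFindA n n.sqrt
def pvK (n : Nat) : Nat := n / (pvA n * pvA n)

lemma pvFindA_spec (x : Nat) : ∀ t : Nat, (∃ d, 0 < d ∧ d ≤ t ∧ d*d ∣ x) →
    0 < pvFindA x t ∧ pvFindA x t ≤ t ∧ (pvFindA x t)*(pvFindA x t) ∣ x ∧
      ∀ d, d ≤ t → d*d ∣ x → d ≤ pvFindA x t := by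
  intro t
  induction t with
  | zero => rintro ⟨d, hd, hdt, _⟩; omega
  | succ t ih =>
    rintro ⟨d, hd, hdt, hdvd⟩
    by_cases h : x % ((t+1)*(t+1)) = 0
    · refine ⟨by simp [pvFindA, h], by simp [pvFindA, h], ?_, ?_⟩
      · simpa [pvFindA, h] using Nat.dvd_of_mod_eq_zero h
      · intro e het _; simpa [pvFindA, h] using het
    · have hne : d ≠ t+1 := by
        rintro rfl; exact h (Nat.dvd_iff_mod_eq_zero.mp hdvd)
      have hrec := ih ⟨d, hd, by omega, hdvd⟩
      refine ⟨by simpa [pvFindA, h] using hrec.1, ?_, ?_, ?_⟩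
      · have := hrec.2.1; simp only [pvFindA, h, if_false]; omega
      · simpa [pvFindA, h] using hrec.2.2.1
      · intro e het hedvd
        have hne' : e ≠ t+1 := by rintro rfl; exact h (Nat.dvd_iff_mod_eq_zero.mp hedvd)
        simpa [pvFindA, h] using hrec.2.2.2 e (by omega) hedvd

lemma pvA_facts {n : Nat} (hn : 0 < n) :
    0 < pvA n ∧ (pvA n)*(pvA n) ∣ n ∧ ∀ d, d*d ∣ n → d ≤ pvA n := by
  have h := pvFindA_spec n n.sqrt ⟨1, by omega, Nat.sqrt_pos.mpr hn, by simpa using Nat.one_dvd n⟩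
  refine ⟨h.1, h.2.2.1, fun d hd => ?_⟩
  rcases Nat.eq_zero_or_pos d with rfl | hd0
  · omega
  · exact h.2.2.2 d (Nat.le_sqrt.mpr (Nat.le_of_dvd hn hd)) hd

lemma pvK_mul {n : Nat} (hn : 0 < n) : pvK n * (pvA n * pvA n) = n :=
  Nat.div_mul_cancel (pvA_facts hn).2.1

lemma pvK_pos {n : Nat} (hn : 0 < n) : 0 < pvK n := by
  have h := pvK_mul hn
  by_contra h0
  have : pvK n = 0 := by omega
  rw [this] at h; simp at h; omega

lemma pvK_squarefree {n : Nat} (hn : 0 < n) : Squarefree (pvK n) := by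
  rw [Nat.squarefree_iff_prime_squarefree]
  intro p hp hdvd
  obtain ⟨c, hc⟩ := hdvd
  have hdvd2 : (pvA n * p) * (pvA n * p) ∣ n := by
    refine ⟨c, ?_⟩
    calc n = pvK n * (pvA n * pvA n) := (pvK_mul hn).symm
      _ = (p*p*c) * (pvA n * pvA n) := by rw [← hc]
      _ = pvA n * p * (pvA n * p) * c := by ring
  have hle := (pvA_facts hn).2.2 _ hdvd2
  have ha := (pvA_facts hn).1
  have hp2 := hp.two_le
  nlinarith

lemma pvSqDvd {k a c : Nat} (hk : Squarefree k) (h : a*a ∣ k*(c*c)) : a ∣ c := by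
  rcases Nat.eq_zero_or_pos c with rfl | hc
  · rcases Nat.eq_zero_or_pos a with rfl | ha
    · simp
    · -- a*a ∣ 0 trivial; a ∣ 0
      simp
  rcases Nat.eq_zero_or_pos a with rfl | ha
  · exfalso
    have h0 : k*(c*c) = 0 := Nat.eq_zero_of_zero_dvd (by simpa using h)
    have hk0 := hk.ne_zero
    simp [Nat.mul_eq_zero] at h0
    omega
  have hk0 : k ≠ 0 := hk.ne_zero
  have hrhs : k*(c*c) ≠ 0 := by positivity
  have hfle := (Nat.factorization_le_iff_dvd (by positivity) hrhs).mpr h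
  rw [← Nat.factorization_le_iff_dvd (by omega) (by omega)]
  rw [Finsupp.le_def] at hfle ⊢
  intro p
  have h1 := hfle p
  rw [Nat.factorization_mul (by omega) (by omega)] at h1
  rw [Nat.factorization_mul hk0 (by positivity), Nat.factorization_mul (by omega) (by omega)] at h1
  simp only [Finsupp.add_apply] at h1
  have h2 := (Nat.squarefree_iff_factorization_le_one hk0).mp hk p
  omega

lemma pvF4 {n : Nat} (hn : 0 < n) {m z : Nat} (h : z*z = n*m) : ∃ b, m = pvK n * (b*b) := by
  rcases Nat.eq_zero_or_pos m with rfl | hm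
  · exact ⟨0, by simp⟩
  have hk0 : 0 < pvK n := pvK_pos hn
  have hsq := pvK_squarefree hn
  have hkz : pvK n ∣ z := by
    rw [← Squarefree.dvd_pow_iff_dvd hsq (two_ne_zero)]
    calc pvK n ∣ n := ⟨pvA n * pvA n, (pvK_mul hn).symm⟩
      _ ∣ n*m := Dvd.intro m rfl
      _ = z^2 := by rw [← h]; ring
  obtain ⟨c, hc⟩ := hkz
  have hmain : pvK n * (c*c) = (pvA n * pvA n) * m := by
    have : pvK n * (pvK n * (c*c)) = pvK n * ((pvA n * pvA n) * m) := by
      calc pvK n * (pvK n * (c*c)) = (pvK n * c) * (pvK n * c) := by ring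
        _ = z*z := by rw [← hc]
        _ = n*m := h
        _ = (pvK n * (pvA n * pvA n)) * m := by rw [pvK_mul hn]
        _ = pvK n * ((pvA n * pvA n)*m) := by ring
    exact Nat.eq_of_mul_eq_mul_left hk0 this
  have hac : pvA n ∣ c := pvSqDvd hsq ⟨m, hmain⟩
  obtain ⟨e, he⟩ := hac
  refine ⟨e, ?_⟩
  have ha : 0 < pvA n := (pvA_facts hn).1
  have : (pvA n * pvA n) * m = (pvA n * pvA n) * (pvK n * (e*e)) := by
    rw [← hmain, he]; ring
  exact (Nat.eq_of_mul_eq_mul_left (by positivity) this)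
def pvEnt (x y z : Int) : List (List Int) := [x, y, z] :: (if y ≠ x then [[y, x, z]] else [])

lemma pvGuard_iff {M : Int} {k b : Nat} (hk : 0 < k) :
    k*b*b ≤ M.toNat ↔ b ≤ Nat.sqrt (M.toNat / k) := by
  rw [Nat.le_sqrt, Nat.le_div_iff_mul_le hk]
  constructor <;> intro h <;> nlinarith

lemma pvLoopB_eq (M : Int) (k a : Nat) (x : Int) (hk : 0 < k) :
    ∀ (f b : Nat) (acc : List (List Int)), Nat.sqrt (M.toNat / k) + 1 - b = f →
    pvLoopB M k a x b acc =
      acc ++ (List.range' b (Nat.sqrt (M.toNat / k) + 1 - b)).flatMap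
        (fun b' => pvEnt x ((k*b'*b' : Nat) : Int) ((k*a*b' : Nat) : Int)) := by
  intro f
  induction f with
  | zero =>
    intro b acc hf
    have hb : Nat.sqrt (M.toNat / k) < b := by omega
    rw [pvLoopB]
    have : ¬ (0 < k ∧ k*b*b ≤ M.toNat) := by
      rintro ⟨-, hle⟩; exact absurd ((pvGuard_iff hk).mp hle) (by omega)
    simp [this, hf]
  | succ f ih =>
    intro b acc hf
    have hb : b ≤ Nat.sqrt (M.toNat / k) := by omega
    rw [pvLoopB]
    have hg : 0 < k ∧ k*b*b ≤ M.toNat := ⟨hk, (pvGuard_iff hk).mpr hb⟩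
    simp only [hg, and_self, dite_true]
    rw [ih (b+1) _ (by omega)]
    have hcnt : Nat.sqrt (M.toNat / k) + 1 - b = (Nat.sqrt (M.toNat / k) + 1 - (b+1)) + 1 := by omega
    rw [hcnt, List.range'_succ, List.flatMap_cons]
    simp only [pvEnt]
    split_ifs with hyx <;> simp

def pvZ (x y : Int) : Int := (((x*y).toNat.sqrt : Nat) : Int)
def pvGA (M x y : Int) : List (List Int) := if pvZ x y * pvZ x y = x*y ∧ pvZ x y ≤ M then pvEnt x y (pvZ x y) else []

lemma pvMulSquare {n : Nat} (hn : 0 < n) (b : Nat) :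
    n * (pvK n * b * b) = (pvK n * pvA n * b) * (pvK n * pvA n * b) := by
  calc n * (pvK n * b * b) = (pvK n * (pvA n * pvA n)) * (pvK n * b * b) := by rw [pvK_mul hn]
    _ = (pvK n * pvA n * b) * (pvK n * pvA n * b) := by ring

lemma pvZ_val (x : Int) {n : Nat} (hxn : (n : Int) = x) (hn0 : 0 < n) (b : Nat) :
    pvZ x ((pvK n * b * b : Nat) : Int) = ((pvK n * pvA n * b : Nat) : Int) := by
  have h1 : x * ((pvK n * b * b : Nat) : Int) = (((pvK n * pvA n * b) * (pvK n * pvA n * b) : Nat) : Int) := by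
    rw [← hxn]
    exact_mod_cast congrArg (fun t : Nat => (t : Int)) (pvMulSquare hn0 b)
  unfold pvZ
  rw [h1, Int.toNat_natCast]
  congr 1
  have h2 : (pvK n * pvA n * b) * (pvK n * pvA n * b) = (pvK n * pvA n * b)^2 := by ring
  rw [h2, Nat.sqrt_eq']

lemma pvCond_true (M x : Int) {n : Nat} (hxn : (n : Int) = x) (hn0 : 0 < n) (hM : 0 ≤ M)
    {b : Nat} (hab : pvA n ≤ b) (hbM : pvK n * b * b ≤ M.toNat) :
    pvZ x ((pvK n * b * b : Nat) : Int) * pvZ x ((pvK n * b * b : Nat) : Int) = x * ((pvK n * b * b : Nat) : Int) ∧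
      pvZ x ((pvK n * b * b : Nat) : Int) ≤ M := by
  rw [pvZ_val x hxn hn0 b]
  constructor
  · rw [← hxn]
    exact_mod_cast congrArg (fun t : Nat => (t : Int)) (pvMulSquare hn0 b).symm
  · have h1 : pvK n * pvA n * b ≤ pvK n * b * b :=
      Nat.mul_le_mul (Nat.mul_le_mul le_rfl hab) le_rfl
    have h2 : pvK n * pvA n * b ≤ M.toNat := le_trans h1 hbM
    calc ((pvK n * pvA n * b : Nat) : Int) ≤ ((M.toNat : Nat) : Int) := by exact_mod_cast h2
      _ = M := Int.toNat_of_nonneg hM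

lemma pvFilter_eq (M x : Int) (h1 : 1 ≤ x) (h2 : x ≤ M) :
    (PySem.List.pyRange x (M+1) 1).filter (fun y => decide (pvZ x y * pvZ x y = x*y ∧ pvZ x y ≤ M)) =
      (List.range' (pvA x.toNat) (Nat.sqrt (M.toNat / pvK x.toNat) + 1 - pvA x.toNat)).map
        (fun b => ((pvK x.toNat * b * b : Nat) : Int)) := by
  have hxn : (x.toNat : Int) = x := Int.toNat_of_nonneg (by omega)
  have hn0 : 0 < x.toNat := by omega
  have hk := pvK_pos hn0
  have ha := (pvA_facts hn0).1
  have hmul := pvK_mul hn0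
  have hM : (0:Int) ≤ M := by omega
  have hsorted1 : (List.filter (fun y => decide (pvZ x y * pvZ x y = x*y ∧ pvZ x y ≤ M)) (PySem.List.pyRange x (M+1) 1)).Pairwise (· < ·) :=
    (PySem.List.pairwise_lt_pyRange_one x (M+1)).filter _
  have hsorted2 : ((List.range' (pvA x.toNat) (Nat.sqrt (M.toNat / pvK x.toNat) + 1 - pvA x.toNat)).map
      (fun b => ((pvK x.toNat * b * b : Nat) : Int))).Pairwise (· < ·) := by
    refine List.Pairwise.map _ (fun p q (hpq : p < q) => ?_) (List.pairwise_lt_range' 1)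
    have hpp := Nat.mul_self_lt_mul_self hpq
    have : pvK x.toNat * p * p < pvK x.toNat * q * q := by
      rw [mul_assoc, mul_assoc]
      exact (Nat.mul_lt_mul_left hk).mpr hpp
    exact_mod_cast this
  have hmem : ∀ y, (y ∈ (PySem.List.pyRange x (M+1) 1).filter (fun y => decide (pvZ x y * pvZ x y = x*y ∧ pvZ x y ≤ M))) ↔
      (y ∈ (List.range' (pvA x.toNat) (Nat.sqrt (M.toNat / pvK x.toNat) + 1 - pvA x.toNat)).map
        (fun b => ((pvK x.toNat * b * b : Nat) : Int))) := by
    intro y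
    rw [List.mem_filter, List.mem_map, PySem.List.mem_pyRange_one, decide_eq_true_eq]
    constructor
    · rintro ⟨⟨hxy, hyM⟩, hc1, hc2⟩
      have hy1 : 1 ≤ y := le_trans h1 hxy
      have hyn : (y.toNat : Int) = y := Int.toNat_of_nonneg (by omega)
      have hprod : x * y = ((x.toNat * y.toNat : Nat) : Int) := by
        conv_lhs => rw [← hxn, ← hyn]
        push_cast; ring
      have hc1' : (x.toNat * y.toNat).sqrt * (x.toNat * y.toNat).sqrt = x.toNat * y.toNat := by
        have h := hc1
        unfold pvZ at h
        rw [hprod, Int.toNat_natCast] at h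
        exact_mod_cast h
      obtain ⟨b, hb⟩ := pvF4 hn0 hc1'
      have hnb : x.toNat ≤ y.toNat := by omega
      have hab : pvA x.toNat ≤ b := by
        have : pvK x.toNat * (pvA x.toNat * pvA x.toNat) ≤ pvK x.toNat * (b*b) := by omega
        have h3 : pvA x.toNat * pvA x.toNat ≤ b*b := Nat.le_of_mul_le_mul_left this hk
        exact Nat.mul_self_le_mul_self_iff.mp h3
      have hbs : b ≤ Nat.sqrt (M.toNat / pvK x.toNat) := by
        have hyM' : y.toNat ≤ M.toNat := by omega
        have : pvK x.toNat * b * b ≤ M.toNat := by rw [mul_assoc]; omega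
        exact (pvGuard_iff hk).mp this
      refine ⟨b, List.mem_range'_1.mpr ⟨hab, by omega⟩, ?_⟩
      rw [← hyn, hb, mul_assoc]
    · rintro ⟨b, hbmem, rfl⟩
      rw [List.mem_range'_1] at hbmem
      have hbs : b ≤ Nat.sqrt (M.toNat / pvK x.toNat) := by omega
      have hbM : pvK x.toNat * b * b ≤ M.toNat := (pvGuard_iff hk).mpr hbs
      have hab : pvA x.toNat ≤ b := hbmem.1
      have hcond := pvCond_true M x hxn hn0 hM hab hbM
      refine ⟨⟨?_, ?_⟩, hcond.1, hcond.2⟩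
      · rw [← hxn]
        have : x.toNat ≤ pvK x.toNat * b * b := by
          have h3 : pvA x.toNat * pvA x.toNat ≤ b*b := Nat.mul_self_le_mul_self hab
          calc x.toNat = pvK x.toNat * (pvA x.toNat * pvA x.toNat) := hmul.symm
            _ ≤ pvK x.toNat * (b*b) := Nat.mul_le_mul_left _ h3
            _ = pvK x.toNat * b * b := by ring
        exact_mod_cast this
      · have : ((pvK x.toNat * b * b : Nat) : Int) ≤ M := by
          calc ((pvK x.toNat * b * b : Nat) : Int) ≤ ((M.toNat : Nat) : Int) := by exact_mod_cast hbM
            _ = M := Int.toNat_of_nonneg hM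
        omega
  exact List.Perm.eq_of_pairwise (fun a b _ _ hab hba => by omega) hsorted1 hsorted2
    ((List.perm_ext_iff_of_nodup (hsorted1.imp ne_of_lt) (hsorted2.imp ne_of_lt)).mpr hmem)

lemma pvFlatMap_congr {α β : Type} {l : List α} {f g : α → List β}
    (h : ∀ x ∈ l, f x = g x) : l.flatMap f = l.flatMap g := by
  induction l with
  | nil => rfl
  | cons a l ih => simp only [List.flatMap_cons, h a (by simp), ih (fun x hx => h x (by simp [hx]))]

lemma pvFlatMap_ite_eq_filter {α β : Type} (p : α → Prop) [DecidablePred p] (f : α → List β)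
    (l : List α) : l.flatMap (fun y => if p y then f y else []) =
      (l.filter (fun y => decide (p y))).flatMap f := by
  induction l with
  | nil => rfl
  | cons a l ih =>
    by_cases h : p a <;> simp [h, ih]

lemma pvInner_eq (M x : Int) (h1 : 1 ≤ x) (h2 : x ≤ M) (acc : List (List Int)) :
    (PySem.List.pyRange x (M+1) 1).foldl (fun triples y =>
      let product := x * y
      let z : Int := ((product.toNat.sqrt : Nat) : Int)
      if z * z = product ∧ z ≤ M then
        let triples := triples ++ [[x, y, z]]
        if y ≠ x then triples ++ [[y, x, z]] else triples
      else triples) acc =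
    pvLoopB M (pvK x.toNat) (pvA x.toNat) x (pvA x.toNat) acc := by
  have hk := pvK_pos (n := x.toNat) (by omega)
  have hxn : (x.toNat : Int) = x := Int.toNat_of_nonneg (by omega)
  have hn0 : 0 < x.toNat := by omega
  have hstep : (PySem.List.pyRange x (M+1) 1).foldl (fun triples y =>
      let product := x * y
      let z : Int := ((product.toNat.sqrt : Nat) : Int)
      if z * z = product ∧ z ≤ M then
        let triples := triples ++ [[x, y, z]]
        if y ≠ x then triples ++ [[y, x, z]] else triples
      else triples) acc =
      (PySem.List.pyRange x (M+1) 1).foldl (fun acc2 y => acc2 ++ pvGA M x y) acc := by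
    apply PySem.List.foldl_congr_mem
    intro acc2 y _
    dsimp only
    unfold pvGA pvEnt pvZ
    split_ifs with hc hyx <;> simp
  rw [hstep, PySem.List.foldl_append_eq_flatMap]
  have hga : (PySem.List.pyRange x (M+1) 1).flatMap (pvGA M x) =
      (PySem.List.pyRange x (M+1) 1).flatMap
        (fun y => if pvZ x y * pvZ x y = x*y ∧ pvZ x y ≤ M then pvEnt x y (pvZ x y) else []) := rfl
  rw [hga, pvFlatMap_ite_eq_filter, pvFilter_eq M x h1 h2, List.flatMap_map]
  rw [pvFlatMap_congr (fun b _ => by rw [pvZ_val x hxn hn0 b])]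
  rw [← pvLoopB_eq M (pvK x.toNat) (pvA x.toNat) x hk _ (pvA x.toNat) acc rfl]

-- ===== VERDICT (by name: the statement is the Claim_ definition above) =====
theorem precompute_triples_spec : Claim_equal_precompute_triples := by
  intro M _
  unfold Spec_precompute_triples precompute_triples precompute_triples_alt
  apply PySem.List.foldl_congr_mem
  intro acc x hx
  rw [PySem.List.mem_pyRange_one] at hx
  exact pvInner_eq M x hx.1 (by omega) acc
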